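-- pv_equiv track=rewrite | github.com/leihchen/leetcode | mac/codesignal.py | solution
-- ===== SOURCE A (Python) =====
-- def solution(s):
--     n = len(s)
--     res = 0
--     for i in range(1, n):
--         for j in range(i+1, n):
--             a = s[:i]
--             b = s[i:j]
--             c = s[j:]
--             if a + b != b + c and b + c != c + a and a + b != c + a:
--                 res += 1
--     return res
-- ===== SOURCE B (Python) =====
-- def solution(s):
--     n = len(s)
--     res = 0
--     for i in range(1, n):
--         # the three equalities force j onto a line each; collect the bad j's
--         bad = set()
--         j = n - i
--         if i < j and s[:j] == s[i:]:
--             bad.add(j)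
--         j = 2 * i
--         if i < j < n and s[i:] == s[j:] + s[:i]:
--             bad.add(j)
--         if (n + i) % 2 == 0:
--             j = (n + i) // 2
--             if i < j < n and s[:j] == s[j:] + s[:i]:
--                 bad.add(j)
--         res += (n - 1 - i) - len(bad)
--     return res
-- ===== Notes on version B (the rewrite author's own statement) =====
-- stated objective: faster
-- what changed: Instead of testing every split (i,j) by building and comparing three concatenations, B notes each equality a+b=b+c, b+c=c+a, a+b=c+a forces j onto one line (j=n-i, j=2i, 2j=n+i) because strings of different length differ, so per i it checks at most three candidate j's and subtracts the set of distinct bad ones from the closed-form count n-1-i.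
import Mathlib
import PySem

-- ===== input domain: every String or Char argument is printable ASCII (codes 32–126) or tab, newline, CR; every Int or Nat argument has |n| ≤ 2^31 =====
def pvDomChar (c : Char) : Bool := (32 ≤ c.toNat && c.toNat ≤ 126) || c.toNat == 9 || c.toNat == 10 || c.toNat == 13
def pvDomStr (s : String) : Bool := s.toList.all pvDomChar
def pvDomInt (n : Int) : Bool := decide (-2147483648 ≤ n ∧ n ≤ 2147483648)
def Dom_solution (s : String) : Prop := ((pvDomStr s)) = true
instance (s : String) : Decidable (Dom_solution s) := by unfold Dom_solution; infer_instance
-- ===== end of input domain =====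

-- B replaces A's O(n^3) scan of all (i,j) splits by a per-i count: each of the
-- three equalities fixes j (strings of different length differ), so B checks at
-- most three candidate j's per i and subtracts the distinct bad ones (faster).

-- ===== PORT A =====
def solution (s : String) : Int :=
  let cs := s.toList
  let n : Int := cs.length
  (PySem.List.pyRange 1 n 1).foldl (fun res i =>
    (PySem.List.pyRange (i + 1) n 1).foldl (fun res j =>
      let a := PySem.List.slice cs none (some i)
      let b := PySem.List.slice cs (some i) (some j)
      let c := PySem.List.slice cs (some j) none
      if a ++ b ≠ b ++ c ∧ b ++ c ≠ c ++ a ∧ a ++ b ≠ c ++ a then res + 1 else res) res) 0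

-- ===== PORT B =====
-- B: for each i the three string equalities can only hold at one j each
-- (j = n-i, j = 2i, 2j = n+i: concatenations of different length differ);
-- count the distinct bad j's per i and subtract from the closed-form total.
def solution_alt (s : String) : Int :=
  let cs := s.toList
  let n : Int := cs.length
  (PySem.List.pyRange 1 n 1).foldl (fun res i =>
    let bad : PySem.Set Int := PySem.Set.empty
    let j1 := n - i
    let bad := if i < j1 ∧ PySem.List.slice cs none (some j1) = PySem.List.slice cs (some i) none then
        PySem.Set.add bad j1 else bad
    let j2 := 2 * i
    let bad := if i < j2 ∧ j2 < n ∧ PySem.List.slice cs (some i) none = PySem.List.slice cs (some j2) none ++ PySem.List.slice cs none (some i) then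
        PySem.Set.add bad j2 else bad
    let bad := if PySem.Int.mod (n + i) 2 = 0 then
        let j3 := PySem.Int.floordiv (n + i) 2
        if i < j3 ∧ j3 < n ∧ PySem.List.slice cs none (some j3) = PySem.List.slice cs (some j3) none ++ PySem.List.slice cs none (some i) then
          PySem.Set.add bad j3 else bad
      else bad
    res + (n - 1 - i) - PySem.Set.len bad) 0

-- ===== PRECONDITION & SPEC =====
def Spec_solution (s : String) (out : Int) : Prop := out = solution_alt s
instance (s : String) (out : Int) : Decidable (Spec_solution s out) := by unfold Spec_solution; infer_instance

-- ===== CLAIM (what is proved, stated in full; the proofs are below) =====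
def Claim_equal_solution : Prop := ∀ (s : String), Dom_solution s → Spec_solution s (solution s)

-- ===== LEMMAS AND PROOFS =====

-- the per-pair condition of A's inner loop (proof-side name for the port's test)
abbrev Qp (cs : List Char) (i j : Int) : Prop :=
  PySem.List.slice cs none (some i) ++ PySem.List.slice cs (some i) (some j) ≠
    PySem.List.slice cs (some i) (some j) ++ PySem.List.slice cs (some j) none ∧
  PySem.List.slice cs (some i) (some j) ++ PySem.List.slice cs (some j) none ≠
    PySem.List.slice cs (some j) none ++ PySem.List.slice cs none (some i) ∧
  PySem.List.slice cs none (some i) ++ PySem.List.slice cs (some i) (some j) ≠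
    PySem.List.slice cs (some j) none ++ PySem.List.slice cs none (some i)

-- the per-i set of bad j's, exactly as solution_alt's loop body builds it
def badOf (cs : List Char) (i : Int) : List Int :=
  let n : Int := cs.length
  let bad : PySem.Set Int := PySem.Set.empty
  let j1 := n - i
  let bad := if i < j1 ∧ PySem.List.slice cs none (some j1) = PySem.List.slice cs (some i) none then
      PySem.Set.add bad j1 else bad
  let j2 := 2 * i
  let bad := if i < j2 ∧ j2 < n ∧ PySem.List.slice cs (some i) none = PySem.List.slice cs (some j2) none ++ PySem.List.slice cs none (some i) then
      PySem.Set.add bad j2 else bad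
  if PySem.Int.mod (n + i) 2 = 0 then
    let j3 := PySem.Int.floordiv (n + i) 2
    if i < j3 ∧ j3 < n ∧ PySem.List.slice cs none (some j3) = PySem.List.slice cs (some j3) none ++ PySem.List.slice cs none (some i) then
      PySem.Set.add bad j3 else bad
  else bad

theorem mem_ite_add (c : Prop) [Decidable c] (s : PySem.Set Int) (x j : Int) :
    (j ∈ (if c then PySem.Set.add s x else s)) ↔ (j ∈ s ∨ (c ∧ j = x)) := by
  split_ifs with h <;> simp [PySem.Set.mem_add, h]

theorem nodup_badOf (cs : List Char) (i : Int) : (badOf cs i).Nodup := by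
  simp only [badOf]
  split_ifs <;>
    first
      | exact List.nodup_nil
      | { repeat' apply PySem.Set.nodup_add
          exact List.nodup_nil }

-- membership in badOf, phrased over take/drop and Int % , /
theorem mem_badOf (cs : List Char) (i j : Int) (h1 : 1 ≤ i) (h2 : i < (cs.length : Int)) :
    j ∈ badOf cs i ↔
      ((i < (cs.length : Int) - i ∧ cs.take ((cs.length : Int) - i).toNat = cs.drop i.toNat)
          ∧ j = (cs.length : Int) - i)
      ∨ ((i < 2 * i ∧ 2 * i < (cs.length : Int)
            ∧ cs.drop i.toNat = cs.drop (2 * i).toNat ++ cs.take i.toNat)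
          ∧ j = 2 * i)
      ∨ ((((cs.length : Int) + i) % 2 = 0 ∧ i < ((cs.length : Int) + i) / 2
            ∧ ((cs.length : Int) + i) / 2 < (cs.length : Int)
            ∧ cs.take (((cs.length : Int) + i) / 2).toNat
                = cs.drop (((cs.length : Int) + i) / 2).toNat ++ cs.take i.toNat)
          ∧ j = ((cs.length : Int) + i) / 2) := by
  simp only [badOf]
  rw [PySem.Int.mod_eq_emod_of_pos (by norm_num), PySem.Int.floordiv_eq_ediv_of_pos (by norm_num)]
  rw [PySem.List.slice_to cs (show (0:Int) ≤ (cs.length:Int) - i by omega),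
    PySem.List.slice_from cs (show (0:Int) ≤ i by omega),
    PySem.List.slice_from cs (show (0:Int) ≤ 2 * i by omega),
    PySem.List.slice_to cs (show (0:Int) ≤ i by omega),
    PySem.List.slice_to cs (show (0:Int) ≤ ((cs.length:Int) + i) / 2 by omega),
    PySem.List.slice_from cs (show (0:Int) ≤ ((cs.length:Int) + i) / 2 by omega)]
  by_cases hm : ((cs.length:Int) + i) % 2 = 0
  · rw [if_pos hm]
    simp only [mem_ite_add, PySem.Set.empty, List.not_mem_nil]
    tauto
  · rw [if_neg hm]
    simp only [mem_ite_add, PySem.Set.empty, List.not_mem_nil]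
    tauto

theorem concat_take_drop (cs : List Char) (iN jN : Nat) (hij : iN ≤ jN) :
    cs.take iN ++ (cs.drop iN).take (jN - iN) = cs.take jN := by
  rw [← List.take_add]
  congr 1
  omega

theorem concat_drop (cs : List Char) (iN jN : Nat) (hij : iN ≤ jN) :
    (cs.drop iN).take (jN - iN) ++ cs.drop jN = cs.drop iN := by
  have h := List.take_append_drop (jN - iN) (cs.drop iN)
  rw [List.drop_drop] at h
  rwa [show iN + (jN - iN) = jN by omega] at h

theorem notQ_iff (cs : List Char) (i j : Int)
    (h1 : 1 ≤ i) (hij : i < j) (hj : j < (cs.length : Int)) :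
    (¬ Qp cs i j) ↔ j ∈ badOf cs i := by
  rw [mem_badOf cs i j h1 (by omega)]
  simp only [Qp]
  rw [PySem.List.slice_to cs (show (0:Int) ≤ i by omega),
    PySem.List.slice_from cs (show (0:Int) ≤ j by omega),
    PySem.List.slice_toNat cs (show (0:Int) ≤ i by omega) (show (0:Int) ≤ j by omega),
    concat_take_drop cs i.toNat j.toNat (by omega),
    concat_drop cs i.toNat j.toNat (by omega)]
  rw [not_and_or, not_and_or]
  simp only [not_not, ne_eq]
  constructor
  · rintro (E1 | E2 | E3)
    · have hl := congrArg List.length E1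
      simp only [List.length_take, List.length_drop] at hl
      left
      refine ⟨⟨by omega, ?_⟩, by omega⟩
      rw [show ((cs.length : Int) - i).toNat = j.toNat by omega]
      exact E1
    · have hl := congrArg List.length E2
      simp only [List.length_take, List.length_drop, List.length_append] at hl
      right; left
      refine ⟨⟨by omega, by omega, ?_⟩, by omega⟩
      rw [show ((2 : Int) * i).toNat = j.toNat by omega]
      exact E2
    · have hl := congrArg List.length E3
      simp only [List.length_take, List.length_drop, List.length_append] at hl
      right; right
      refine ⟨⟨by omega, by omega, by omega, ?_⟩, by omega⟩
      rw [show (((cs.length : Int) + i) / 2).toNat = j.toNat by omega]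
      exact E3
  · rintro (⟨⟨hlt, he⟩, hj'⟩ | ⟨⟨hlt, hlt2, he⟩, hj'⟩ | ⟨⟨hm, hlt, hlt2, he⟩, hj'⟩)
    · subst hj'; exact Or.inl he
    · subst hj'; exact Or.inr (Or.inl he)
    · subst hj'; exact Or.inr (Or.inr he)

theorem countP_split {α : Type} (p : α → Bool) (l : List α) :
    l.countP p + l.countP (fun x => !p x) = l.length := by
  induction l with
  | nil => rfl
  | cons a t ih => by_cases h : p a <;> simp [h] <;> omega

theorem foldl_count_if_prop {α : Type} (P : α → Prop) [DecidablePred P] (l : List α) (a : Int) :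
    l.foldl (fun acc x => if P x then acc + 1 else acc) a
      = a + (l.countP (fun x => decide (P x)) : Int) := by
  have h := PySem.List.foldl_count_if (fun x => decide (P x)) l a
  simpa using h

theorem badOf_subset (cs : List Char) (i j : Int) (h1 : 1 ≤ i) (h2 : i < (cs.length : Int))
    (hj : j ∈ badOf cs i) : j ∈ PySem.List.pyRange (i + 1) (cs.length : Int) 1 := by
  rw [mem_badOf cs i j h1 h2] at hj
  rw [PySem.List.mem_pyRange_one]
  rcases hj with ⟨⟨hlt, _⟩, hj'⟩ | ⟨⟨hlt, hlt2, _⟩, hj'⟩ | ⟨⟨_, hlt, hlt2, _⟩, hj'⟩ <;> omega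

theorem inner_count (cs : List Char) (i : Int) (h1 : 1 ≤ i) (h2 : i < (cs.length : Int)) :
    ((PySem.List.pyRange (i + 1) (cs.length : Int) 1).countP (fun j => decide (Qp cs i j)) : Int)
      = ((cs.length : Int) - 1 - i) - ((badOf cs i).length : Int) := by
  have hsplit := countP_split (fun j => decide (Qp cs i j)) (PySem.List.pyRange (i + 1) (cs.length : Int) 1)
  have hbad : (PySem.List.pyRange (i + 1) (cs.length : Int) 1).countP
      (fun j => !(decide (Qp cs i j))) = (badOf cs i).length := by
    rw [List.countP_eq_length_filter]
    rw [List.filter_congr (q := fun j => decide (j ∈ badOf cs i))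
      (fun j hj => by
        rw [PySem.List.mem_pyRange_one] at hj
        simp only [Bool.not_eq_eq_eq_not]
        simp only [← notQ_iff cs i j h1 (by omega) (by omega)]
        by_cases h : Qp cs i j <;> simp [h])]
    refine List.Perm.length_eq ?_
    rw [List.perm_ext_iff_of_nodup (List.Nodup.filter _ (PySem.List.nodup_pyRange_one _ _)) (nodup_badOf cs i)]
    intro x
    simp only [List.mem_filter, decide_eq_true_eq]
    exact ⟨fun ⟨_, h⟩ => h, fun h => ⟨badOf_subset cs i x h1 h2 h, h⟩⟩
  have hlen := PySem.List.length_pyRange_one (i + 1) (cs.length : Int)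
  have hble : (badOf cs i).length ≤ (PySem.List.pyRange (i + 1) (cs.length : Int) 1).length := by
    rw [← hbad]; exact List.countP_le_length
  omega

theorem body_eq (cs : List Char) (res i : Int) (h1 : 1 ≤ i) (h2 : i < (cs.length : Int)) :
    (PySem.List.pyRange (i + 1) (cs.length : Int) 1).foldl
        (fun res j => if Qp cs i j then res + 1 else res) res
      = res + ((cs.length : Int) - 1 - i) - PySem.Set.len (badOf cs i) := by
  rw [foldl_count_if_prop, inner_count cs i h1 h2]
  show _ = res + ((cs.length : Int) - 1 - i) - ((badOf cs i).length : Int)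
  ring

theorem solution_spec : Claim_equal_solution := by
  intro s _
  unfold Spec_solution
  simp only [solution, solution_alt]
  apply PySem.List.foldl_congr_mem
  intro res i hi
  rw [PySem.List.mem_pyRange_one] at hi
  exact body_eq s.toList res i (by omega) (by omega)
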